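-- pv_equiv track=rewrite | github.com/agheieff/RegionAI | demo_sequential_analysis.py | find_chains
-- ===== SOURCE A (Python) =====
-- def find_chains(start_verb, sequence_map, max_depth=5, current_chain=None):
--     """Find all chains starting from a verb."""
--     if current_chain is None:
--         current_chain = [start_verb]
--
--     if len(current_chain) >= max_depth:
--         return [current_chain]
--
--     chains = []
--     next_verbs = sequence_map.get(start_verb, [])
--
--     if not next_verbs:
--         return [current_chain]
--
--     for next_verb in next_verbs:
--         if next_verb not in current_chain:  # Avoid cycles
--             new_chain = current_chain + [next_verb]
--             chains.extend(find_chains(next_verb, sequence_map, max_depth, new_chain))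
--
--     return chains if chains else [current_chain]
-- ===== SOURCE B (Python) =====
-- def find_chains(start_verb, sequence_map, max_depth=5, current_chain=None):
--     """Find all chains starting from a verb (iterative DFS with an explicit stack)."""
--     results = []
--     stack = [(start_verb, [start_verb] if current_chain is None else current_chain)]
--     while stack:
--         verb, chain = stack.pop()
--         successors = sequence_map.get(verb, [])
--         valid = [s for s in successors if s not in chain]
--         if len(chain) >= max_depth or not successors or not valid:
--             results.append(chain)
--         else:
--             for s in reversed(valid):
--                 stack.append((s, chain + [s]))
--     return results
-- ===== Notes on version B (the rewrite author's own statement) =====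
-- stated objective: alternative
-- what changed: Replaces A's recursive backtracking (recursion per successor with extend) by an iterative DFS over an explicit stack of (verb, chain) pairs, pushing valid successors in reverse so pops reproduce A's preorder output exactly.
import Mathlib
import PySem

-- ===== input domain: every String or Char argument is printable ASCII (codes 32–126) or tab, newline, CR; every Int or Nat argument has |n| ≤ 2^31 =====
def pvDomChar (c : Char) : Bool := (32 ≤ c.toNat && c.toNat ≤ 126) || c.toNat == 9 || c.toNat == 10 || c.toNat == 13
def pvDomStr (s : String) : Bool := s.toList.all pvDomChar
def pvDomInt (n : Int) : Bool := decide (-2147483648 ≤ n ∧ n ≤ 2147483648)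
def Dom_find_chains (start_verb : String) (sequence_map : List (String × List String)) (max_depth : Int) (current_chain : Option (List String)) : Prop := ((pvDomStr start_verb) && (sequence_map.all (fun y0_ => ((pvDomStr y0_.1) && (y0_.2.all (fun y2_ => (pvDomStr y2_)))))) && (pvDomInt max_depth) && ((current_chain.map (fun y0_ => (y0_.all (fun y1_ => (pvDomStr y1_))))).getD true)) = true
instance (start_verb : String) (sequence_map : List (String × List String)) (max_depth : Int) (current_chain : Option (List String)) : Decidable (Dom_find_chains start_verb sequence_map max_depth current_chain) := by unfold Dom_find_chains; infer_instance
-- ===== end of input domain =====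

-- B replaces A's recursive enumeration by an iterative DFS with an explicit stack (alternative
-- decomposition, same output in the same order). Return-value equivalence only; neither mutates.

-- ===== PORT A =====
-- Recursive A, transliterated; the depth guard `len(current_chain) >= max_depth` is made
-- structural via fuel = (max_depth - len(chain)).toNat, which is 0 exactly on that guard and
-- decreases by exactly 1 on each recursive call (new_chain is one longer), so this is exact.
def findChainsGo (sequence_map : List (String × List String)) : Nat → String → List String → List (List String)
  | 0, _, chain => [chain]                                   -- `if len(current_chain) >= max_depth: return [current_chain]`
  | f + 1, start_verb, chain =>
    let next_verbs := (List.lookup start_verb sequence_map).getD []   -- `sequence_map.get(start_verb, [])` (first match)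
    if next_verbs = [] then [chain]                          -- `if not next_verbs: return [current_chain]`
    else
      let chains := next_verbs.foldl (fun acc next_verb =>
        if chain.contains next_verb then acc                 -- `if next_verb not in current_chain` (skip otherwise)
        else acc ++ findChainsGo sequence_map f next_verb (chain ++ [next_verb])) []
      if chains = [] then [chain] else chains                -- `return chains if chains else [current_chain]`

def find_chains (start_verb : String) (sequence_map : List (String × List String)) (max_depth : Int) (current_chain : Option (List String)) : List (List String) :=
  let chain := current_chain.getD [start_verb]               -- `if current_chain is None: current_chain = [start_verb]`
  findChainsGo sequence_map (max_depth - chain.length).toNat start_verb chain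

-- ===== PORT B =====
-- Termination measure for B's stack loop: entry (v, chain) weighs base^(md-|chain|) where base
-- exceeds every successor-list length by 2; a pop pushes at most base-2 children of strictly
-- smaller exponent, so the total weight strictly decreases (pvPush_lt, cited by decreasing_by).
def pvBase (sequence_map : List (String × List String)) : Nat :=
  (sequence_map.map (fun p => p.2.length)).foldl max 0 + 2

def pvChainW (sequence_map : List (String × List String)) (max_depth : Int) (chain : List String) : Nat :=
  pvBase sequence_map ^ (max_depth - chain.length).toNat

def pvStackW (sequence_map : List (String × List String)) (max_depth : Int) (stack : List (String × List String)) : Nat :=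
  (stack.map (fun p => pvChainW sequence_map max_depth p.2)).sum

theorem pvBase_two_le (sm : List (String × List String)) : 2 ≤ pvBase sm := by
  unfold pvBase; omega

theorem pvChainW_pos (sm : List (String × List String)) (md : Int) (c : List String) :
    1 ≤ pvChainW sm md c :=
  Nat.pow_pos (lt_of_lt_of_le (by norm_num) (pvBase_two_le sm))

theorem pvStackW_append (sm : List (String × List String)) (md : Int)
    (a b : List (String × List String)) :
    pvStackW sm md (a ++ b) = pvStackW sm md a + pvStackW sm md b := by
  simp [pvStackW]

theorem pvStackW_cons (sm : List (String × List String)) (md : Int)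
    (p : String × List String) (t : List (String × List String)) :
    pvStackW sm md (p :: t) = pvChainW sm md p.2 + pvStackW sm md t := by
  simp [pvStackW]

theorem pvLookup_len_le (sm : List (String × List String)) (v : String) :
    ((List.lookup v sm).getD []).length ≤ pvBase sm - 2 := by
  have hb : ((List.lookup v sm).getD []).length ≤ (sm.map (fun p => p.2.length)).foldl max 0 := by
    rcases h : List.lookup v sm with _ | l
    · simp
    · have hm : l.length ∈ sm.map (fun p => p.2.length) := by
        induction sm with
        | nil => simp [List.lookup] at h
        | cons p t ih =>
          by_cases hk : v == p.1
          · simp [List.lookup, hk] at h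
            simp [h]
          · simp only [List.lookup, hk] at h
            simp [ih h]
      exact (PySem.List.le_foldl_max (sm.map (fun p => p.2.length)) 0).2 _ hm
  unfold pvBase
  omega

theorem pvStackW_push (sm : List (String × List String)) (md : Int) (c : List String)
    (L : List String) :
    pvStackW sm md (L.map (fun s => (s, c ++ [s])))
      = L.length * pvBase sm ^ (md - ((c.length : Int) + 1)).toNat := by
  induction L with
  | nil => simp [pvStackW]
  | cons s t ih =>
    rw [List.map_cons, pvStackW_cons, ih]
    have : pvChainW sm md (c ++ [s]) = pvBase sm ^ (md - ((c.length : Int) + 1)).toNat := by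
      unfold pvChainW
      congr 1
      simp [List.length_append]
    rw [this, List.length_cons]
    ring

theorem pvPush_lt (sm : List (String × List String)) (md : Int) (v : String) (c : List String)
    (h1 : (c.length : Int) < md) :
    pvStackW sm md (((((List.lookup v sm).getD []).filter (fun s => !c.contains s)).map
        (fun s => (s, c ++ [s])))) < pvChainW sm md c := by
  rw [pvStackW_push]
  have hlen : ((((List.lookup v sm).getD []).filter (fun s => !c.contains s))).length ≤ pvBase sm - 2 :=
    (List.length_filter_le _ _).trans (pvLookup_len_le sm v)
  have hb := pvBase_two_le sm
  have hp : 0 < pvBase sm ^ (md - ((c.length : Int) + 1)).toNat :=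
    Nat.pow_pos (by omega)
  have hC : pvChainW sm md c = pvBase sm * pvBase sm ^ (md - ((c.length : Int) + 1)).toNat := by
    unfold pvChainW
    have hexp : (md - (c.length : Int)).toNat = (md - ((c.length : Int) + 1)).toNat + 1 := by omega
    rw [hexp, pow_succ]
    ring
  rw [hC]
  exact Nat.mul_lt_mul_of_lt_of_le (by omega) le_rfl hp

-- `while stack: verb, chain = stack.pop(); …` — the Lean list's head is the Python list's END
-- (the pop/push side); pushing `reversed(valid)` conses the children in order (pvRevPush).
theorem pvRevPush {α β : Type} (l : List α) (f : α → β) (acc : List β) :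
    l.reverse.foldl (fun st s => f s :: st) acc = l.map f ++ acc := by
  induction l generalizing acc with
  | nil => rfl
  | cons x t ih => simp [List.reverse_cons, List.foldl_append, ih]

def altLoop (sm : List (String × List String)) (md : Int) : List (String × List String) → List (List String) → List (List String)
  | [], results => results
  | (verb, chain) :: rest, results =>
    let successors := (List.lookup verb sm).getD []          -- `sequence_map.get(verb, [])`
    let valid := successors.filter (fun s => !chain.contains s)
    if h : (chain.length : Int) ≥ md ∨ successors = [] ∨ valid = [] then
      altLoop sm md rest (results ++ [chain])                -- `results.append(chain)`
    else
      altLoop sm md (valid.reverse.foldl (fun st s => (s, chain ++ [s]) :: st) rest) results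
  termination_by stack _ => pvStackW sm md stack
  decreasing_by
  · rw [pvStackW_cons]
    have : 1 ≤ pvChainW sm md (verb, chain).2 := pvChainW_pos sm md chain
    omega
  · push_neg at h
    rw [pvRevPush, pvStackW_append, pvStackW_cons]
    exact Nat.add_lt_add_right (pvPush_lt sm md verb chain (by omega)) _

def find_chains_alt (start_verb : String) (sequence_map : List (String × List String)) (max_depth : Int) (current_chain : Option (List String)) : List (List String) :=
  altLoop sequence_map max_depth [(start_verb, current_chain.getD [start_verb])] []

-- ===== PRECONDITION & SPEC =====
def Spec_find_chains (start_verb : String) (sequence_map : List (String × List String)) (max_depth : Int) (current_chain : Option (List String)) (out : List (List String)) : Prop := out = find_chains_alt start_verb sequence_map max_depth current_chain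
instance (start_verb : String) (sequence_map : List (String × List String)) (max_depth : Int) (current_chain : Option (List String)) (out : List (List String)) : Decidable (Spec_find_chains start_verb sequence_map max_depth current_chain out) := by unfold Spec_find_chains; infer_instance

-- ===== CLAIM (what is proved, stated in full; the proofs are below) =====
def Claim_equal_find_chains : Prop := ∀ (start_verb : String) (sequence_map : List (String × List String)) (max_depth : Int) (current_chain : Option (List String)), Dom_find_chains start_verb sequence_map max_depth current_chain → Spec_find_chains start_verb sequence_map max_depth current_chain (find_chains start_verb sequence_map max_depth current_chain)

-- ===== LEMMAS AND PROOFS =====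

-- A's recursion always returns at least [chain].
theorem go_ne_nil (sm : List (String × List String)) (f : Nat) (v : String) (c : List String) :
    findChainsGo sm f v c ≠ [] := by
  cases f with
  | zero => simp [findChainsGo]
  | succ f =>
    simp only [findChainsGo]
    split_ifs with h1 h2 <;> simp_all

-- A's accumulation loop is a flatMap over the cycle-free successors.
theorem go_foldl_flatMap (sm : List (String × List String)) (f : Nat) (c : List String)
    (l : List String) (acc : List (List String)) :
    l.foldl (fun acc nv => if c.contains nv then acc else acc ++ findChainsGo sm f nv (c ++ [nv])) acc
      = acc ++ (l.filter (fun s => !c.contains s)).flatMap (fun nv => findChainsGo sm f nv (c ++ [nv])) := by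
  induction l generalizing acc with
  | nil => simp
  | cons x t ih =>
    rw [List.foldl_cons, List.filter_cons]
    cases hx : c.contains x with
    | true =>
      rw [if_pos rfl, if_neg (by simp)]
      exact ih acc
    | false =>
      rw [if_neg (by simp), if_pos (show (!false) = true from rfl)]
      rw [ih (acc ++ findChainsGo sm f x (c ++ [x]))]
      simp [List.flatMap_cons, List.append_assoc]

-- The stack loop emits, for each stack entry in order, exactly A's chains from that entry.
theorem altLoop_eq (sm : List (String × List String)) (md : Int) (n : Nat) :
    ∀ (stack : List (String × List String)) (res : List (List String)),
      pvStackW sm md stack ≤ n →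
      altLoop sm md stack res
        = res ++ stack.flatMap (fun p => findChainsGo sm (md - p.2.length).toNat p.1 p.2) := by
  induction n with
  | zero =>
    intro stack res h
    cases stack with
    | nil => simp [altLoop]
    | cons p t =>
      exfalso
      have := pvChainW_pos sm md p.2
      rw [pvStackW_cons] at h
      omega
  | succ n ih =>
    intro stack res h
    match stack with
    | [] => simp [altLoop]
    | (v, c) :: rest =>
      rw [altLoop]
      by_cases hleaf : (c.length : Int) ≥ md ∨ (List.lookup v sm).getD [] = []
          ∨ (((List.lookup v sm).getD []).filter (fun s => !c.contains s)) = []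
      · rw [dif_pos hleaf]
        have hrest : pvStackW sm md rest ≤ n := by
          rw [pvStackW_cons] at h
          have h' : pvChainW sm md c + pvStackW sm md rest ≤ n + 1 := h
          have := pvChainW_pos sm md c
          omega
        rw [ih rest (res ++ [c]) hrest]
        have hgo : findChainsGo sm (md - c.length).toNat v c = [c] := by
          rcases hleaf with h1 | h2 | h3
          · have h0 : (md - (c.length : Int)).toNat = 0 := by omega
            rw [h0]; rfl
          · cases hf : (md - (c.length : Int)).toNat with
            | zero => rfl
            | succ f => simp [findChainsGo, h2]
          · cases hf : (md - (c.length : Int)).toNat with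
            | zero => rfl
            | succ f =>
              simp only [findChainsGo]
              split_ifs with h2 h4
              · rfl
              · rfl
              · exact absurd (by rw [go_foldl_flatMap, h3]; simp) h4
        rw [List.flatMap_cons, hgo, ← List.append_assoc]
      · rw [dif_neg hleaf]
        push_neg at hleaf
        obtain ⟨h1, h2, h3⟩ := hleaf
        rw [pvRevPush]
        set valid := (((List.lookup v sm).getD []).filter (fun s => !c.contains s)) with hvalid
        have hless : pvStackW sm md (valid.map (fun s => (s, c ++ [s])) ++ rest) ≤ n := by
          rw [pvStackW_append]
          rw [pvStackW_cons] at h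
          have h' : pvChainW sm md c + pvStackW sm md rest ≤ n + 1 := h
          have := pvPush_lt sm md v c (by omega)
          rw [← hvalid] at this
          omega
        rw [ih _ res hless]
        have hch : (valid.map (fun s => (s, c ++ [s]))).flatMap
              (fun p => findChainsGo sm (md - p.2.length).toNat p.1 p.2)
            = findChainsGo sm (md - c.length).toNat v c := by
          rw [List.flatMap_map]
          have hfun : ∀ s, findChainsGo sm (md - ((c ++ [s]).length : Int)).toNat s (c ++ [s])
              = findChainsGo sm (md - ((c.length : Int) + 1)).toNat s (c ++ [s]) := by
            intro s
            congr 2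
            simp [List.length_append]
          have hexp : (md - (c.length : Int)).toNat = (md - ((c.length : Int) + 1)).toNat + 1 := by
            omega
          rw [hexp]
          simp only [findChainsGo]
          rw [if_neg h2, go_foldl_flatMap, List.nil_append, ← hvalid]
          rw [if_neg]
          · exact List.flatMap_congr (fun s _ => hfun s)
          · rcases hv : valid with _ | ⟨s, t⟩
            · exact absurd hv h3
            · simp only [List.flatMap_cons]
              intro hcontra
              exact go_ne_nil sm _ s (c ++ [s]) (List.append_eq_nil_iff.mp hcontra).1
        rw [List.flatMap_append, hch]
        simp

-- ===== VERDICT (by name: the statement is the Claim_ definition above) =====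
theorem find_chains_spec : Claim_equal_find_chains := by
  intro sv sm md cc _
  unfold Spec_find_chains find_chains find_chains_alt
  rw [altLoop_eq sm md (pvStackW sm md [(sv, cc.getD [sv])]) _ _ le_rfl]
  simp
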